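-- pv_equiv track=rewrite | github.com/abdul-haseeb5786/Learning-Python | Day7/Day7.py | return_sum
-- ===== SOURCE A (Python) =====
-- def return_sum(l):
--     even_sum = 0
--     odd_sum = 0
--     div3_sum = 0
--
--     for i in l:
--         if i % 2 == 0:
--             even_sum = even_sum + i
--         if i % 2 == 1:
--             odd_sum = odd_sum + i
--         if i % 3 == 0:
--             div3_sum = div3_sum + i
--     return even_sum, odd_sum, div3_sum
-- ===== SOURCE B (Python) =====
-- def return_sum(l):
--     even_sum = sum(i for i in l if i % 2 == 0)
--     odd_sum = sum(i for i in l if i % 2 == 1)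
--     div3_sum = sum(i for i in l if i % 3 == 0)
--     return even_sum, odd_sum, div3_sum
-- ===== Notes on version B (the rewrite author's own statement) =====
-- stated objective: simpler
-- what changed: Replaces the single loop carrying three accumulators with three independent filtered sums over the list, one per predicate.
import Mathlib
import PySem

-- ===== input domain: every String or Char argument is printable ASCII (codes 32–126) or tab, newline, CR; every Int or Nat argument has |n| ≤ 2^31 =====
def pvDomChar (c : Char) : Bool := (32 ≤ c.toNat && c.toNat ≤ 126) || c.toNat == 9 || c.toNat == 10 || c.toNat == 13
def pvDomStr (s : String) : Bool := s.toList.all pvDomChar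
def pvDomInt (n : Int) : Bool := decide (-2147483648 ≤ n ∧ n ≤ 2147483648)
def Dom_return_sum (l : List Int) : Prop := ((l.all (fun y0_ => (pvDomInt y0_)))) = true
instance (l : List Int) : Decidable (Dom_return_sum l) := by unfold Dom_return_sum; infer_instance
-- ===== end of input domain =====

-- B replaces A's single loop with three accumulators by three independent filtered sums (simpler decomposition).

-- A-side helper: one loop iteration
def rsStep (acc : Int × Int × Int) (i : Int) : Int × Int × Int :=
  let acc := if PySem.Int.mod i 2 = 0 then (acc.1 + i, acc.2.1, acc.2.2) else acc
  let acc := if PySem.Int.mod i 2 = 1 then (acc.1, acc.2.1 + i, acc.2.2) else acc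
  let acc := if PySem.Int.mod i 3 = 0 then (acc.1, acc.2.1, acc.2.2 + i) else acc
  acc

-- ===== PORT A =====
def return_sum (l : List Int) : Int × Int × Int :=
  l.foldl rsStep (0, 0, 0)

-- ===== PORT B =====
def return_sum_alt (l : List Int) : Int × Int × Int :=
  ((l.filter (fun i => PySem.Int.mod i 2 = 0)).sum,
   (l.filter (fun i => PySem.Int.mod i 2 = 1)).sum,
   (l.filter (fun i => PySem.Int.mod i 3 = 0)).sum)

-- ===== PRECONDITION & SPEC =====
def Spec_return_sum (l : List Int) (out : Int × Int × Int) : Prop := out = return_sum_alt l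
instance (l : List Int) (out : Int × Int × Int) : Decidable (Spec_return_sum l out) := by unfold Spec_return_sum; infer_instance

-- ===== CLAIM =====
def Claim_equal_return_sum : Prop := ∀ (l : List Int), Dom_return_sum l → Spec_return_sum l (return_sum l)

-- ===== LEMMAS AND PROOFS =====
theorem return_sum_inv (l : List Int) (a b c : Int) :
    l.foldl rsStep (a, b, c)
    = (a + (l.filter (fun i => PySem.Int.mod i 2 = 0)).sum,
       b + (l.filter (fun i => PySem.Int.mod i 2 = 1)).sum,
       c + (l.filter (fun i => PySem.Int.mod i 3 = 0)).sum) := by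
  induction l generalizing a b c with
  | nil => simp
  | cons x xs ih =>
    have m2 : ∀ a : Int, PySem.Int.mod a 2 = a % 2 := fun a =>
      PySem.Int.mod_eq_emod_of_pos (by norm_num)
    have m3 : ∀ a : Int, PySem.Int.mod a 3 = a % 3 := fun a =>
      PySem.Int.mod_eq_emod_of_pos (by norm_num)
    simp only [List.foldl_cons, List.filter_cons, rsStep, m2, m3]
    by_cases h0 : x % 2 = 0 <;> by_cases h1 : x % 2 = 1 <;> by_cases h3 : x % 3 = 0 <;>
      simp [h0, h1, h3, ih, Prod.ext_iff] <;> omega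

-- ===== VERDICT =====
theorem return_sum_spec : Claim_equal_return_sum := by
  intro l _
  unfold Spec_return_sum return_sum return_sum_alt
  rw [return_sum_inv]
  simp
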